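-- pv_equiv track=rewrite | github.com/SuperPC328/Tower-crane-parts-inspection | sift.py | count_matched_kp
-- ===== SOURCE A (Python) =====
-- def count_matched_kp(kp_set, target_kp_set):
--     d = [(i % 3 - 1, j % 3 - 1) for i in range(3) for j in range(3)]
--     # d = [(-1, -1), (-1, 0), (-1, 1), (0, -1), (0, 0), (0, 1), (1, -1), (1, 0), (1, 1)]
--     count = 0
--     for i in target_kp_set:
--         for j in d:
--             if (i[0] + j[0], i[1] + j[1]) in kp_set:
--                 count += 1
--                 break
--     return count
-- ===== SOURCE B (Python) =====
-- def count_matched_kp(kp_set, target_kp_set):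
--     expanded = set()
--     for p in kp_set:
--         for dx in (-1, 0, 1):
--             for dy in (-1, 0, 1):
--                 expanded.add((p[0] + dx, p[1] + dy))
--     return sum(1 for i in target_kp_set if i in expanded)
-- ===== Notes on version B (the rewrite author's own statement) =====
-- stated objective: faster
-- what changed: Instead of testing all 9 neighbors of every target point against kp_set with a list membership scan, B dilates kp_set once into a hash set of all neighbor points and does a single O(1) membership test per target point.
import Mathlib
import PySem

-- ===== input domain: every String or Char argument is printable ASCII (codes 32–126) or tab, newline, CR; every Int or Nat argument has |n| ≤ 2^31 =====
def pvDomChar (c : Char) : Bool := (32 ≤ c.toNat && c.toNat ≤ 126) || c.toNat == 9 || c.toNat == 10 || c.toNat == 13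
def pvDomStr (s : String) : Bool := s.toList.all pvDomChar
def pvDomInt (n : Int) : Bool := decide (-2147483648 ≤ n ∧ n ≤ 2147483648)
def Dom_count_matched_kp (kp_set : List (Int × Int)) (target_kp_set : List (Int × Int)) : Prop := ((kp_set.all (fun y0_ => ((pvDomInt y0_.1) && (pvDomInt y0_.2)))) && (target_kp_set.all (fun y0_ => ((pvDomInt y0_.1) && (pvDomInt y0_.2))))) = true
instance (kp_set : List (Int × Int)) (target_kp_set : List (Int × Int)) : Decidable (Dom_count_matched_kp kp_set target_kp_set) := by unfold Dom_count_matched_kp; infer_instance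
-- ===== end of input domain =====

-- B builds the 9-neighbor dilation of kp_set into a set once, then does one membership
-- test per target point (faster: removes A's per-target scan of kp_set for each offset).

-- ===== PORT A =====
-- d = [(i % 3 - 1, j % 3 - 1) for i in range(3) for j in range(3)]
def pvD_A : List (Int × Int) :=
  (PySem.List.pyRange 0 3 1).flatMap (fun i =>
    (PySem.List.pyRange 0 3 1).map (fun j => (PySem.Int.mod i 3 - 1, PySem.Int.mod j 3 - 1)))

-- the inner 'for j in d: if …: count += 1; break' — true iff the loop breaks
def pvFirstMatch (kp_set : List (Int × Int)) (i : Int × Int) : List (Int × Int) → Bool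
  | [] => false
  | j :: rest => if (i.1 + j.1, i.2 + j.2) ∈ kp_set then true else pvFirstMatch kp_set i rest

def count_matched_kp (kp_set : List (Int × Int)) (target_kp_set : List (Int × Int)) : Int :=
  target_kp_set.foldl (fun count i => if pvFirstMatch kp_set i pvD_A then count + 1 else count) 0

-- ===== PORT B =====
-- one step of the dilation: add the 9 neighbors of p to the set
def pvDilate (s : PySem.Set (Int × Int)) (p : Int × Int) : PySem.Set (Int × Int) :=
  ([-1, 0, 1] : List Int).foldl (fun s dx =>
    ([-1, 0, 1] : List Int).foldl (fun s dy => PySem.Set.add s (p.1 + dx, p.2 + dy)) s) s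

def count_matched_kp_alt (kp_set : List (Int × Int)) (target_kp_set : List (Int × Int)) : Int :=
  let expanded := kp_set.foldl pvDilate PySem.Set.empty
  target_kp_set.foldl (fun c i => c + (if PySem.Set.contains expanded i then 1 else 0)) 0

-- ===== PRECONDITION & SPEC =====
def Spec_count_matched_kp (kp_set : List (Int × Int)) (target_kp_set : List (Int × Int)) (out : Int) : Prop := out = count_matched_kp_alt kp_set target_kp_set
instance (kp_set : List (Int × Int)) (target_kp_set : List (Int × Int)) (out : Int) : Decidable (Spec_count_matched_kp kp_set target_kp_set out) := by unfold Spec_count_matched_kp; infer_instance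

-- ===== CLAIM (what is proved, stated in full; the proofs are below) =====
def Claim_equal_count_matched_kp : Prop := ∀ (kp_set : List (Int × Int)) (target_kp_set : List (Int × Int)), Dom_count_matched_kp kp_set target_kp_set → Spec_count_matched_kp kp_set target_kp_set (count_matched_kp kp_set target_kp_set)

-- ===== LEMMAS AND PROOFS =====

lemma pvD_A_eval : pvD_A = [(-1,-1),(-1,0),(-1,1),(0,-1),(0,0),(0,1),(1,-1),(1,0),(1,1)] := by decide

lemma pvFirstMatch_iff (kp : List (Int × Int)) (i : Int × Int) (l : List (Int × Int)) :
    pvFirstMatch kp i l = true ↔ ∃ j ∈ l, (i.1 + j.1, i.2 + j.2) ∈ kp := by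
  induction l with
  | nil => simp [pvFirstMatch]
  | cons j rest ih =>
      simp only [pvFirstMatch, List.mem_cons]
      split_ifs with h
      · simp [h]
      · simp [ih]
        tauto

lemma mem_pvDilate (s : PySem.Set (Int × Int)) (p i : Int × Int) :
    i ∈ pvDilate s p ↔ i ∈ s ∨ ∃ j ∈ pvD_A, i = (p.1 + j.1, p.2 + j.2) := by
  simp [pvDilate, pvD_A_eval, List.foldl, PySem.Set.mem_add]
  tauto

lemma mem_foldl_pvDilate (kp : List (Int × Int)) (s : PySem.Set (Int × Int)) (i : Int × Int) :
    i ∈ kp.foldl pvDilate s ↔ i ∈ s ∨ ∃ p ∈ kp, ∃ j ∈ pvD_A, i = (p.1 + j.1, p.2 + j.2) := by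
  induction kp generalizing s with
  | nil => simp
  | cons p kp ih =>
      simp only [List.foldl_cons, ih, mem_pvDilate, List.mem_cons]
      constructor
      · rintro ((h | h) | ⟨q, hq, h⟩)
        · exact Or.inl h
        · exact Or.inr ⟨p, Or.inl rfl, h⟩
        · exact Or.inr ⟨q, Or.inr hq, h⟩
      · rintro (h | ⟨q, (rfl | hq), h⟩)
        · exact Or.inl (Or.inl h)
        · exact Or.inl (Or.inr h)
        · exact Or.inr ⟨q, hq, h⟩

lemma pvD_A_neg {j : Int × Int} (h : j ∈ pvD_A) : (-j.1, -j.2) ∈ pvD_A := by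
  rw [pvD_A_eval] at h ⊢
  fin_cases h <;> decide

-- pointwise: A's inner break-loop agrees with B's membership in the dilated set
lemma pointwise (kp : List (Int × Int)) (i : Int × Int) :
    pvFirstMatch kp i pvD_A = PySem.Set.contains (kp.foldl pvDilate PySem.Set.empty) i := by
  rw [Bool.eq_iff_iff, pvFirstMatch_iff, PySem.Set.contains_iff, mem_foldl_pvDilate]
  simp only [PySem.Set.empty, List.not_mem_nil, false_or]
  constructor
  · rintro ⟨j, hj, hmem⟩
    refine ⟨(i.1 + j.1, i.2 + j.2), hmem, (-j.1, -j.2), pvD_A_neg hj, ?_⟩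
    cases i; simp
  · rintro ⟨p, hp, j, hj, rfl⟩
    refine ⟨(-j.1, -j.2), pvD_A_neg hj, ?_⟩
    simpa using hp

lemma fold_count_eq (P Q : (Int × Int) → Bool) (hPQ : ∀ i, P i = Q i) :
    ∀ (l : List (Int × Int)) (c : Int),
      l.foldl (fun c i => if P i then c + 1 else c) c =
      l.foldl (fun c i => c + (if Q i then 1 else 0)) c := by
  intro l
  induction l with
  | nil => intro c; rfl
  | cons x l ih =>
      intro c
      simp only [List.foldl_cons]
      rw [ih]
      congr 1
      rw [hPQ]
      cases h : Q x <;> simp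

-- ===== VERDICT (by name: the statement is the Claim_ definition above) =====
theorem count_matched_kp_spec : Claim_equal_count_matched_kp := by
  intro kp target _
  unfold Spec_count_matched_kp count_matched_kp count_matched_kp_alt
  exact fold_count_eq _ _ (pointwise kp) target 0
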